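-- pv_equiv track=rewrite | github.com/linmingchih/sim_service | scripts/run_quickeye.py | build_netlist
-- ===== SOURCE A (Python) =====
-- def build_netlist(cell_path: str, count: int) -> str:
--     """Return a Nexxim netlist that cascades *count* S-parameter cells."""
--     netlist_template = (
--         '.model cell S TSTONEFILE="{}"\n'
--         '+ INTERPOLATION=LINEAR INTDATTYP=MA HIGHPASS=10 LOWPASS=10 '
--         'convolution=0 enforce_passivity=0 enforce_adpe=1 Noisemodel=External\n\n'
--         '{}\n'
--     )
--
--     nodes = [('Port1', 'Port2'), ('Port3', 'Port4')]
--     for i in range(count - 1):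
--         nodes.insert(-1, (f'net_p{i}', f'net_n{i}'))
--
--     network = []
--     for idx in range(len(nodes) - 1):
--         n1, n2 = nodes[idx]
--         n3, n4 = nodes[idx + 1]
--         network.append(f'S{idx} {n1} {n2} {n3} {n4} FQMODEL="cell"')
--
--     return netlist_template.format(cell_path, '\n'.join(network))
-- ===== SOURCE B (Python) =====
-- def build_netlist(cell_path: str, count: int) -> str:
--     """Return a Nexxim netlist that cascades *count* S-parameter cells."""
--     segments = max(count, 1)
--     left = ('Port1', 'Port2')
--     lines = []
--     for idx in range(segments):
--         right = ('Port3', 'Port4') if idx == segments - 1 else (f'net_p{idx}', f'net_n{idx}')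
--         lines.append(f'S{idx} {left[0]} {left[1]} {right[0]} {right[1]} FQMODEL="cell"')
--         left = right
--     return (
--         f'.model cell S TSTONEFILE="{cell_path}"\n'
--         '+ INTERPOLATION=LINEAR INTDATTYP=MA HIGHPASS=10 LOWPASS=10 '
--         'convolution=0 enforce_passivity=0 enforce_adpe=1 Noisemodel=External\n\n'
--         + '\n'.join(lines) + '\n'
--     )
-- ===== Notes on version B (the rewrite author's own statement) =====
-- stated objective: simpler
-- what changed: B drops A's intermediate node-list construction (repeated insert(-1)) and second indexing pass: one loop over segment indices carries the current left node pair and derives the right pair from the index.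
import Mathlib
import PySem

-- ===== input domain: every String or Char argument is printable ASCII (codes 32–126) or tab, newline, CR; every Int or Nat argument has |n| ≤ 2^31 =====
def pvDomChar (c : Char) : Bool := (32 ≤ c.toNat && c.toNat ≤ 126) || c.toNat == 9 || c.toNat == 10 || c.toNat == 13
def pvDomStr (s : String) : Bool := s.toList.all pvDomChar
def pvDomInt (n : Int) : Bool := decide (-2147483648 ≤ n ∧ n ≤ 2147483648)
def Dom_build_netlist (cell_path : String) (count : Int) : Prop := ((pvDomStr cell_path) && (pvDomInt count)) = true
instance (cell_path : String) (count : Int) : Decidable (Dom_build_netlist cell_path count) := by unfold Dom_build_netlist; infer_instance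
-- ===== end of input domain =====

-- B replaces A's node-list construction (repeated insert(-1)) and second indexing pass by a single
-- loop over segment indices that carries the current left node pair (objective: simpler).

-- ===== PORT A =====
def build_netlist (cell_path : String) (count : Int) : String :=
  let nodes := (PySem.List.pyRange 0 (count - 1) 1).foldl
      (fun ns i => PySem.List.insert ns (-1)
        ("net_p" ++ PySem.Int.toStr i, "net_n" ++ PySem.Int.toStr i))
      [("Port1", "Port2"), ("Port3", "Port4")]
  let network := (PySem.List.pyRange 0 (PySem.List.len nodes - 1) 1).foldl
      (fun acc idx =>
        let n12 := PySem.List.pyGetD nodes idx ("", "")      -- index always in range here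
        let n34 := PySem.List.pyGetD nodes (idx + 1) ("", "")
        acc ++ ["S" ++ PySem.Int.toStr idx ++ " " ++ n12.1 ++ " " ++ n12.2 ++ " "
                ++ n34.1 ++ " " ++ n34.2 ++ " FQMODEL=\"cell\""])
      []
  ".model cell S TSTONEFILE=\"" ++ cell_path
    ++ "\"\n+ INTERPOLATION=LINEAR INTDATTYP=MA HIGHPASS=10 LOWPASS=10 convolution=0 enforce_passivity=0 enforce_adpe=1 Noisemodel=External\n\n"
    ++ PySem.Str.join "\n" network ++ "\n"

-- ===== PORT B =====
def bnStep (segments : Int) (st : List String × (String × String)) (idx : Int) :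
    List String × (String × String) :=
  let left := st.2
  let right := if idx == segments - 1 then ("Port3", "Port4")
               else ("net_p" ++ PySem.Int.toStr idx, "net_n" ++ PySem.Int.toStr idx)
  (st.1 ++ ["S" ++ PySem.Int.toStr idx ++ " " ++ left.1 ++ " " ++ left.2 ++ " "
            ++ right.1 ++ " " ++ right.2 ++ " FQMODEL=\"cell\""], right)

def build_netlist_alt (cell_path : String) (count : Int) : String :=
  let segments := max count 1
  let lines := ((PySem.List.pyRange 0 segments 1).foldl (bnStep segments)
      ([], ("Port1", "Port2"))).1
  ".model cell S TSTONEFILE=\"" ++ cell_path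
    ++ "\"\n+ INTERPOLATION=LINEAR INTDATTYP=MA HIGHPASS=10 LOWPASS=10 convolution=0 enforce_passivity=0 enforce_adpe=1 Noisemodel=External\n\n"
    ++ PySem.Str.join "\n" lines ++ "\n"

-- ===== PRECONDITION & SPEC =====
def Spec_build_netlist (cell_path : String) (count : Int) (out : String) : Prop := out = build_netlist_alt cell_path count
instance (cell_path : String) (count : Int) (out : String) : Decidable (Spec_build_netlist cell_path count out) := by unfold Spec_build_netlist; infer_instance

-- ===== CLAIM =====
def Claim_equal_build_netlist : Prop := ∀ (cell_path : String) (count : Int), Dom_build_netlist cell_path count → Spec_build_netlist cell_path count (build_netlist cell_path count)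

-- ===== LEMMAS AND PROOFS =====

def netPair (i : Int) : String × String := ("net_p" ++ PySem.Int.toStr i, "net_n" ++ PySem.Int.toStr i)
def netsL (N : Nat) : List (String × String) := (List.range N).map (fun j : Nat => netPair (Int.ofNat j))

def rightAt (N k : Nat) : String × String := if k = N then ("Port3", "Port4") else netPair ↑k
def leftAt (N k : Nat) : String × String := if k = 0 then ("Port1", "Port2") else rightAt N (k - 1)
def lineAt (N k : Nat) : String :=
  "S" ++ PySem.Int.toStr ↑k ++ " " ++ (leftAt N k).1 ++ " " ++ (leftAt N k).2 ++ " "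
    ++ (rightAt N k).1 ++ " " ++ (rightAt N k).2 ++ " FQMODEL=\"cell\""

theorem length_netsL (N : Nat) : (netsL N).length = N := by simp [netsL]

-- Python's nodes.insert(-1, v) on a list with at least one element before the last:
theorem insert_neg_one {α : Type} (x z v : α) (mids : List α) :
    PySem.List.insert (x :: mids ++ [z]) (-1) v = x :: (mids ++ [v]) ++ [z] := by
  have hlen : (x :: mids ++ [z]).length = mids.length + 2 := by simp
  simp only [PySem.List.insert, PySem.List.sliceIndices, hlen]
  norm_num
  have h1 : (max (-1 + (↑mids.length + 2)) 0 : Int).toNat = mids.length + 1 := by omega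
  rw [h1]
  simp [List.take_succ_cons, List.drop_succ_cons]

theorem foldl_insert_neg_one {α : Type} (f : Int → α) (x z : α) (l : List Int) (mids : List α) :
    l.foldl (fun ns i => PySem.List.insert ns (-1) (f i)) (x :: mids ++ [z])
      = x :: (mids ++ l.map f) ++ [z] := by
  induction l generalizing mids with
  | nil => simp
  | cons i l ih =>
    simp only [List.foldl_cons, insert_neg_one, ih, List.map_cons, List.append_assoc,
      List.singleton_append]

theorem foldl_append_singleton {α β : Type} (f : α → β) (l : List α) (init : List β) :
    l.foldl (fun acc a => acc ++ [f a]) init = init ++ l.map f := by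
  induction l generalizing init with
  | nil => simp
  | cons a l ih => simp [ih]

theorem nodes_getD (N k : Nat) (hk : k ≤ N) :
    PySem.List.pyGetD (("Port1","Port2") :: (netsL N ++ [("Port3","Port4")])) (↑k) ("","")
      = leftAt N k := by
  rw [PySem.List.pyGetD_natCast,
      List.getD_eq_getElem _ _ (by simp [length_netsL]; omega)]
  cases k with
  | zero => simp [leftAt]
  | succ j =>
    simp only [List.getElem_cons_succ]
    rw [List.getElem_append_left (by rw [length_netsL]; omega)]
    simp only [leftAt, rightAt, Nat.succ_ne_zero, if_false, Nat.add_sub_cancel]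
    rw [if_neg (by omega)]
    simp [netsL, netPair]

theorem nodes_getD' (N k : Nat) (hk : k ≤ N) :
    PySem.List.pyGetD (("Port1","Port2") :: (netsL N ++ [("Port3","Port4")])) (↑k + 1) ("","")
      = rightAt N k := by
  have h1 : (↑k + 1 : Int) = ↑(k+1) := by push_cast; ring
  rw [h1, PySem.List.pyGetD_natCast,
      List.getD_eq_getElem _ _ (by simp [length_netsL]; omega)]
  simp only [List.getElem_cons_succ]
  by_cases hN : k = N
  · subst hN
    rw [List.getElem_append_right (by rw [length_netsL])]
    simp [length_netsL, rightAt]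
  · rw [List.getElem_append_left (by rw [length_netsL]; omega)]
    simp [netsL, netPair, rightAt, hN]

-- B's loop invariant: folding the remaining indices from position k, with the carried
-- left pair equal to leftAt N k, appends exactly the canonical lines.
theorem bnStep_fold (N : Nat) : ∀ (m k : Nat), k + m = N + 1 → ∀ (acc : List String),
    ((List.range' k m).map Int.ofNat).foldl (bnStep ↑(N + 1)) (acc, leftAt N k)
      = (acc ++ (List.range' k m).map (lineAt N), leftAt N (k + m)) := by
  intro m
  induction m with
  | zero => intro k h acc; simp
  | succ m ih =>
    intro k h acc
    rw [List.range'_succ]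
    simp only [List.map_cons, List.foldl_cons]
    have hstep : bnStep ↑(N + 1) (acc, leftAt N k) (Int.ofNat k)
        = (acc ++ [lineAt N k], leftAt N (k + 1)) := by
      simp only [bnStep, lineAt, Int.ofNat_eq_natCast]
      have hc : ((↑k : Int) == (↑(N + 1) : Int) - 1) = (k == N) := by
        by_cases hkN : k = N <;> simp [hkN]
      have hl : leftAt N (k + 1) = rightAt N k := by
        simp [leftAt]
      rw [hc, hl, rightAt]
      by_cases hkN : k = N <;> simp [hkN, netPair]
    rw [hstep, ih (k + 1) (by omega) (acc ++ [lineAt N k])]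
    rw [show k + 1 + m = k + (m + 1) from by omega]
    simp

-- ===== VERDICT =====
theorem build_netlist_spec : Claim_equal_build_netlist := by
  intro cell_path count _
  show build_netlist cell_path count = build_netlist_alt cell_path count
  simp only [build_netlist, build_netlist_alt]
  obtain ⟨N, hNN⟩ : ∃ n : Nat, (count - 1).toNat = n := ⟨_, rfl⟩
  -- A side: nodes is Port1/Port2, N net pairs, Port3/Port4
  have hnodes : (PySem.List.pyRange 0 (count - 1) 1).foldl
      (fun ns i => PySem.List.insert ns (-1)
        ("net_p" ++ PySem.Int.toStr i, "net_n" ++ PySem.Int.toStr i))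
      [("Port1", "Port2"), ("Port3", "Port4")]
      = ("Port1","Port2") :: (netsL N ++ [("Port3","Port4")]) := by
    have h := foldl_insert_neg_one netPair ("Port1","Port2") ("Port3","Port4")
      (PySem.List.pyRange 0 (count - 1) 1) []
    simp only [List.singleton_append, List.nil_append, netPair] at h
    rw [h, PySem.List.pyRange_one]
    rw [show (count - 1 - 0).toNat = N from by omega]
    simp [netsL, netPair, Function.comp_def]
  rw [hnodes]
  have hlen : PySem.List.len (("Port1","Port2") :: (netsL N ++ [("Port3","Port4")])) - 1
      = ((N + 1 : Nat) : Int) := by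
    simp [PySem.List.len, length_netsL]
  have hsegs : max count 1 = ((N + 1 : Nat) : Int) := by omega
  rw [hlen, hsegs, PySem.List.pyRange_zero_natCast, foldl_append_singleton]
  -- B side: unfold the fold via the invariant
  have hB := bnStep_fold N (N + 1) 0 (by omega) []
  rw [show leftAt N 0 = ("Port1", "Port2") from rfl] at hB
  rw [List.range_eq_range', show (fun k : Nat => (↑k : Int)) = Int.ofNat from rfl, hB]
  simp only [List.nil_append, List.map_map]
  exact congrArg
    (fun l => ".model cell S TSTONEFILE=\"" ++ cell_path
      ++ "\"\n+ INTERPOLATION=LINEAR INTDATTYP=MA HIGHPASS=10 LOWPASS=10 convolution=0 enforce_passivity=0 enforce_adpe=1 Noisemodel=External\n\n"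
      ++ PySem.Str.join "\n" l ++ "\n")
    (List.map_congr_left (fun k hk => by
      have hkN : k ≤ N := by
        have := List.mem_range'_1.mp hk; omega
      simp only [Function.comp_apply, Int.ofNat_eq_natCast, nodes_getD N k hkN,
        nodes_getD' N k hkN, lineAt]))
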